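-- pv_equiv track=rewrite | github.com/linzhi2013/MitoZ | bin/annotate/find_contro_region.py | group_regions
-- ===== SOURCE A (Python) =====
-- import collections
-- from itertools import groupby
--
-- def group_regions(seqid_lst=None):
--     seqid_start_len = collections.defaultdict(list)
--     for seqid in seqid_lst:
--         d = seqid_lst[seqid]
--         start = 0
--         # d = [1,1,1,0,0,1,1]
--         # [[1, 1, 1], [0, 0], [1, 1]]
--         for x in [list(g) for k, g in groupby(d)]:
--             range_len = len(x)
--             if x[0] == 0:
--                 seqid_start_len[seqid].append((start, range_len))
--             start = start + range_len
--
--     return seqid_start_len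
-- ===== SOURCE B (Python) =====
-- def group_regions(seqid_lst=None):
--     # Single left-to-right pass per sequence: track the start of the current
--     # zero-run instead of materialising groupby chunks.
--     out = []
--     for seqid, d in seqid_lst.items():
--         runs = []
--         run_start = None
--         for i, x in enumerate(d):
--             if x == 0:
--                 if run_start is None:
--                     run_start = i
--             elif run_start is not None:
--                 runs.append((run_start, i - run_start))
--                 run_start = None
--         if run_start is not None:
--             runs.append((run_start, len(d) - run_start))
--         if runs:
--             out.append((seqid, runs))
--     return dict(out)
-- ===== Notes on version B (the rewrite author's own statement) =====
-- stated objective: faster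
-- what changed: Replaces the itertools.groupby chunking (materialising every run as a list and testing its first element) by a single-pass state machine that tracks the start index of the current zero-run and emits (start, length) at run boundaries, allocating no intermediate group lists.
import Mathlib
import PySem

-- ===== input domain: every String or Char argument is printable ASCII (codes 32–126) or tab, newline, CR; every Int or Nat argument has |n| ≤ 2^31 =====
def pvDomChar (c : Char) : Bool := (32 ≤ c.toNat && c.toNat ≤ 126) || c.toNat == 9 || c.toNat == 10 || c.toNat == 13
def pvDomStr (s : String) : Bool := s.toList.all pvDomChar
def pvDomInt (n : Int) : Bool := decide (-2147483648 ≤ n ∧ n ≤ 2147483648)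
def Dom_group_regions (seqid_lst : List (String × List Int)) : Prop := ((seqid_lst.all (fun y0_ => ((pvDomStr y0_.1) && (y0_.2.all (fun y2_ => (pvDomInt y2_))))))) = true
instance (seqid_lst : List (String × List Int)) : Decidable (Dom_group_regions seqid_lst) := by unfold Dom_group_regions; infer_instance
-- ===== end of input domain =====

-- B replaces A's groupby-chunking by a one-pass zero-run state machine (no intermediate group lists); same output, measured constant-factor speedup.

-- ===== PORT A =====
-- itertools.groupby on a list of ints: the chunks of consecutive equal elements, in order.
def pyGroupby : List Int → List (List Int)
  | [] => []
  | x :: xs =>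
    match pyGroupby xs with
    | [] => [[x]]
    | g :: gs => if g.head? == some x then (x :: g) :: gs else [x] :: g :: gs

-- the inner 'for x in [list(g) for k, g in groupby(d)]' loop; the defaultdict append
-- 'seqid_start_len[seqid].append(t)' is 'insert seqid (getD seqid [] ++ [t])'.
-- x[0] == 0 is 'pyGet? x 0 = some 0' (groups are nonempty, so no IndexError).
def groupRegionsLoopA (seqid : String) :
    List (List Int) → Int → PySem.Dict String (List (Int × Int)) → PySem.Dict String (List (Int × Int))
  | [], _, acc => acc
  | x :: rest, start, acc =>
    let rangeLen : Int := (x.length : Int)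
    let acc' := if PySem.List.pyGet? x 0 = some 0 then
        acc.insert seqid (acc.getD seqid [] ++ [(start, rangeLen)])
      else acc
    groupRegionsLoopA seqid rest (start + rangeLen) acc'

def group_regions (seqid_lst : List (String × List Int)) : List (String × List (Int × Int)) :=
  let dct := PySem.Dict.ofList seqid_lst   -- the parameter is a Python dict
  (dct.keys.foldl (fun acc seqid =>
      groupRegionsLoopA seqid (pyGroupby (dct.getD seqid [])) 0 acc)
    PySem.Dict.empty).items

-- ===== PORT B =====
-- the inner 'for i, x in enumerate(d)' loop of Source B: state = (runs so far, start of open zero-run).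
def scanZeroRuns : List Int → Int → Option Int → List (Int × Int) → List (Int × Int) × Option Int
  | [], _, st, runs => (runs, st)
  | x :: xs, i, st, runs =>
    if x = 0 then
      scanZeroRuns xs (i + 1) (some (st.getD i)) runs
    else
      match st with
      | some s => scanZeroRuns xs (i + 1) none (runs ++ [(s, i - s)])
      | none => scanZeroRuns xs (i + 1) none runs

def zeroRuns (d : List Int) : List (Int × Int) :=
  match scanZeroRuns d 0 none [] with
  | (runs, some s) => runs ++ [(s, (d.length : Int) - s)]
  | (runs, none) => runs

-- Source B appends (seqid, runs) pairs to a list and returns dict(out); the keys are distinct,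
-- so under the assoc-list convention the result IS that list.
def group_regions_alt (seqid_lst : List (String × List Int)) : List (String × List (Int × Int)) :=
  (PySem.Dict.ofList seqid_lst).items.foldl (fun out p =>
    let rs := zeroRuns p.2
    if rs = [] then out else out ++ [(p.1, rs)]) []

-- ===== PRECONDITION & SPEC =====
def Spec_group_regions (seqid_lst : List (String × List Int)) (out : List (String × List (Int × Int))) : Prop := out = group_regions_alt seqid_lst
instance (seqid_lst : List (String × List Int)) (out : List (String × List (Int × Int))) : Decidable (Spec_group_regions seqid_lst out) := by unfold Spec_group_regions; infer_instance

-- ===== CLAIM (what is proved, stated in full; the proofs are below) =====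
def Claim_equal_group_regions : Prop := ∀ (seqid_lst : List (String × List Int)), Dom_group_regions seqid_lst → Spec_group_regions seqid_lst (group_regions seqid_lst)

-- ===== LEMMAS AND PROOFS =====

-- A's loop body, abstracted: the (start, len) pairs A appends, in order.
def runsAspec : List (List Int) → Int → List (Int × Int)
  | [], _ => []
  | x :: rest, start =>
    if PySem.List.pyGet? x 0 = some 0 then
      (start, (x.length : Int)) :: runsAspec rest (start + (x.length : Int))
    else runsAspec rest (start + (x.length : Int))

-- zero runs of xs with absolute indices shifted by i, as A computes them
def zrA (xs : List Int) (i : Int) : List (Int × Int) := runsAspec (pyGroupby xs) i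

-- flush at end index e
def flushAt (r : List (Int × Int) × Option Int) (e : Int) : List (Int × Int) :=
  match r with
  | (runs, some s) => runs ++ [(s, e - s)]
  | (runs, none) => runs

-- open-run merge: an open zero-run from s up to i, in front of the runs of the rest
def mergeS (s i : Int) : List (Int × Int) → List (Int × Int)
  | (s', l) :: t => if s' = i then (s, l + (i - s)) :: t else (s, i - s) :: (s', l) :: t
  | [] => [(s, i - s)]

theorem pyGet?_cons_zero (a : Int) (l : List Int) : PySem.List.pyGet? (a :: l) 0 = some a := by
  simp [PySem.List.pyGet?, PySem.List.pyIdx?]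

theorem pyGroupby_ne_nil (x : Int) (xs : List Int) : pyGroupby (x :: xs) ≠ [] := by
  simp only [pyGroupby]
  split
  · simp
  · split <;> simp

theorem pyGroupby_eq_nil_iff (xs : List Int) : pyGroupby xs = [] ↔ xs = [] := by
  cases xs with
  | nil => simp [pyGroupby]
  | cons x xs => simp [pyGroupby_ne_nil]

theorem pyGroupby_mem_ne_nil (xs : List Int) (g : List Int) (h : g ∈ pyGroupby xs) : g ≠ [] := by
  induction xs generalizing g with
  | nil => simp [pyGroupby] at h
  | cons x xs ih =>
    simp only [pyGroupby] at h
    split at h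
    · simp at h; simp [h]
    · rename_i g' gs heq
      split at h
      · rcases List.mem_cons.mp h with h1 | h2
        · simp [h1]
        · exact ih g (by rw [heq]; exact List.mem_cons_of_mem g' h2)
      · rcases List.mem_cons.mp h with h1 | h2
        · simp [h1]
        · exact ih g (by rw [heq]; exact h2)

theorem runsAspec_head_ge (gl : List (List Int)) (i : Int) (s l : Int) (t : List (Int × Int))
    (h : runsAspec gl i = (s, l) :: t) : i ≤ s := by
  induction gl generalizing i s l t with
  | nil => simp [runsAspec] at h
  | cons x rest ih =>
    simp only [runsAspec] at h
    split at h
    · obtain ⟨h1, -⟩ := Prod.mk.injEq .. ▸ (List.cons.injEq .. ▸ h).1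
      omega
    · have := ih (i + (x.length : Int)) s l t h
      have hx : (0:Int) ≤ (x.length : Int) := Int.natCast_nonneg _
      omega

theorem zrA_cons_ne (x : Int) (xs : List Int) (i : Int) (hx : x ≠ 0) :
    zrA (x :: xs) i = zrA xs (i + 1) := by
  unfold zrA
  cases hg : pyGroupby xs with
  | nil =>
    have hxs : xs = [] := (pyGroupby_eq_nil_iff xs).mp hg
    subst hxs
    simp [pyGroupby, runsAspec, hx]
  | cons g gs =>
    have hgne : g ≠ [] := pyGroupby_mem_ne_nil xs g (by rw [hg]; exact List.mem_cons_self ..)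
    obtain ⟨y, g', rfl⟩ := List.exists_cons_of_ne_nil hgne
    simp only [pyGroupby, hg]
    by_cases hy : y = x
    · subst hy
      simp only [List.head?_cons, beq_self_eq_true, if_true]
      first
      | · simp only [runsAspec, pyGet?_cons_zero, Option.some.injEq, hx, if_false]
          congr 1
          simp only [List.length_cons]
          push_cast
          ring
    · have hcond : ((y :: g').head? == some x) = false := by simp [hy]
      simp only [hcond, Bool.false_eq_true, if_false]
      first
      | · simp only [runsAspec, pyGet?_cons_zero, Option.some.injEq, hx, if_false]
          norm_num

theorem runsAspec_cons_zero (g : List Int) (gs : List (List Int)) (i : Int) :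
    runsAspec ((0 :: g) :: gs) i =
      (i, ((g.length : Int) + 1)) :: runsAspec gs (i + ((g.length : Int) + 1)) := by
  first
  | (simp [runsAspec, pyGet?_cons_zero]; done)
  | (simp [runsAspec, pyGet?_cons_zero]; push_cast; ring_nf; done)
  | (simp [runsAspec, pyGet?_cons_zero]; push_cast; ring_nf; simp; done)
  | (simp only [runsAspec, pyGet?_cons_zero, List.length_cons]; push_cast; ring_nf; simp; done)

theorem runsAspec_cons_nonzero (y : Int) (g : List Int) (gs : List (List Int)) (i : Int)
    (hy : y ≠ 0) :
    runsAspec ((y :: g) :: gs) i = runsAspec gs (i + ((g.length : Int) + 1)) := by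
  first
  | (simp [runsAspec, pyGet?_cons_zero, hy]; done)
  | (simp [runsAspec, pyGet?_cons_zero, hy]; congr 1; push_cast; ring)
  | (simp only [runsAspec, pyGet?_cons_zero, Option.some.injEq, hy, if_false]; congr 1;
     push_cast; ring)

theorem zr_shape_neg (y : Int) (g' : List Int) (gs : List (List Int)) (i : Int) (hy : y ≠ 0) :
    runsAspec ([0] :: (y :: g') :: gs) i =
      (i, 1) :: runsAspec gs (i + 1 + ((g'.length : Int) + 1)) := by
  first
  | (simp [runsAspec, pyGet?_cons_zero, hy]; done)
  | (simp [runsAspec, pyGet?_cons_zero, hy]; push_cast; ring_nf; done)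
  | (simp [runsAspec, pyGet?_cons_zero, hy]; push_cast; ring_nf; simp; done)
  | (simp [runsAspec, pyGet?_cons_zero, hy]; congr 2; push_cast; ring)

theorem zrA_cons_zero (xs : List Int) (i : Int) :
    zrA (0 :: xs) i =
      match zrA xs (i + 1) with
      | (s, l) :: t => if s = i + 1 then (i, l + 1) :: t else (i, 1) :: (s, l) :: t
      | [] => [(i, 1)] := by
  unfold zrA
  cases hg : pyGroupby xs with
  | nil =>
    have hxs : xs = [] := (pyGroupby_eq_nil_iff xs).mp hg
    subst hxs
    simp [pyGroupby, runsAspec, pyGet?_cons_zero]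
  | cons g gs =>
    have hgne : g ≠ [] := pyGroupby_mem_ne_nil xs g (by rw [hg]; exact List.mem_cons_self ..)
    obtain ⟨y, g', rfl⟩ := List.exists_cons_of_ne_nil hgne
    simp only [pyGroupby, hg]
    by_cases hy : y = 0
    · subst hy
      simp only [List.head?_cons, beq_self_eq_true, if_true]
      rw [runsAspec_cons_zero ((0:Int) :: g') gs i, runsAspec_cons_zero g' gs (i + 1)]
      first
      | (simp [List.length_cons]; done)
      | (simp only [List.length_cons]; push_cast; ring_nf; done)
      | (simp only [List.length_cons]; push_cast; ring_nf; simp; done)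
      | (simp [List.length_cons]; push_cast; ring_nf; done)
      | (simp [List.length_cons]; push_cast; ring_nf; simp; done)
    · have hcond : ((y :: g').head? == some (0:Int)) = false := by simp [hy]
      simp only [hcond, Bool.false_eq_true, if_false]
      rw [zr_shape_neg y g' gs i hy, runsAspec_cons_nonzero y g' gs (i + 1) hy]
      cases hr : runsAspec gs (i + 1 + ((g'.length : Int) + 1)) with
      | nil => simp
      | cons p t =>
        obtain ⟨s, l⟩ := p
        have hs := runsAspec_head_ge gs (i + 1 + ((g'.length : Int) + 1)) s l t hr
        have hsne : ¬ (s = i + 1) := by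
          have h0 : (0:Int) ≤ ((g'.length : Nat) : Int) := Int.natCast_nonneg _
          omega
        first
        | (simp [hsne]; done)
        | (simp [hr, hsne]; done)

theorem scanZeroRuns_acc (xs : List Int) (i : Int) (st : Option Int) (runs : List (Int × Int)) :
    scanZeroRuns xs i st runs =
      (runs ++ (scanZeroRuns xs i st []).1, (scanZeroRuns xs i st []).2) := by
  induction xs generalizing i st runs with
  | nil => simp [scanZeroRuns]
  | cons x xs ih =>
    by_cases hx : x = 0
    · simp only [scanZeroRuns, if_pos hx]
      exact ih _ _ runs
    · simp only [scanZeroRuns, if_neg hx]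
      cases st with
      | none => exact ih _ _ runs
      | some s =>
        first
        | · simp only [List.nil_append]
            rw [ih _ _ (runs ++ [(s, i - s)]), ih _ _ ([(s, i - s)])]
            simp

theorem flushAt_append (pre l : List (Int × Int)) (st : Option Int) (e : Int) :
    flushAt (pre ++ l, st) e = pre ++ flushAt (l, st) e := by
  cases st <;> simp [flushAt]

theorem scan_main (xs : List Int) : ∀ (i : Int),
    (flushAt (scanZeroRuns xs i none []) (i + (xs.length : Int)) = zrA xs i) ∧
    (∀ s : Int, flushAt (scanZeroRuns xs i (some s) []) (i + (xs.length : Int)) = mergeS s i (zrA xs i)) := by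
  induction xs with
  | nil =>
    intro i
    constructor
    · simp [scanZeroRuns, flushAt, zrA, pyGroupby, runsAspec]
    · intro s; simp [scanZeroRuns, flushAt, mergeS, zrA, pyGroupby, runsAspec]
  | cons x xs ih =>
    intro i
    have hlen : i + (((x :: xs).length : Nat) : Int) = (i + 1) + ((xs.length : Nat) : Int) := by
      simp only [List.length_cons]; push_cast; ring
    constructor
    · by_cases hx : x = 0
      · simp only [scanZeroRuns, if_pos hx, Option.getD_none]
        rw [hlen, (ih (i + 1)).2 i, hx, zrA_cons_zero]
        cases hr : zrA xs (i + 1) with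
        | nil =>
          first
          | · simp [mergeS]
        | cons p t =>
          obtain ⟨s', l⟩ := p
          by_cases hs : s' = i + 1
          · subst hs
            first
            | (simp [mergeS]; done)
            | (simp [mergeS]; omega)
          · first
            | (simp [mergeS, hs]; done)
            | (simp [mergeS, hs]; omega)
      · simp only [scanZeroRuns, if_neg hx]
        rw [hlen, (ih (i + 1)).1, zrA_cons_ne x xs i hx]
    · intro s
      by_cases hx : x = 0
      · simp only [scanZeroRuns, if_pos hx, Option.getD_some]
        rw [hlen, (ih (i + 1)).2 s, hx, zrA_cons_zero]
        cases hr : zrA xs (i + 1) with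
        | nil =>
          first
          | (simp [mergeS]; done)
          | (simp [mergeS]; omega)
        | cons p t =>
          obtain ⟨s', l⟩ := p
          by_cases hs : s' = i + 1
          · subst hs
            first
            | (simp [mergeS]; done)
            | (simp [mergeS]; omega)
          · have hge : i + 1 ≤ s' := by
              have := runsAspec_head_ge (pyGroupby xs) (i + 1) s' l t (by simpa [zrA] using hr)
              omega
            first
            | (simp [mergeS, hs, show ¬ (s' = i) by omega]; done)
            | (simp [mergeS, hs, show ¬ (s' = i) by omega]; omega)
      · simp only [scanZeroRuns, if_neg hx, List.nil_append]
        rw [scanZeroRuns_acc xs (i + 1) none [(s, i - s)]]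
        rw [hlen]
        have h2 := (ih (i + 1)).1
        cases hscan : scanZeroRuns xs (i + 1) none [] with
        | mk r1 r2 =>
          rw [hscan] at h2
          rw [flushAt_append [(s, i - s)] r1 r2]
          rw [h2, zrA_cons_ne x xs i hx]
          cases hr : zrA xs (i + 1) with
          | nil =>
            first
            | · simp [mergeS]
          | cons p t =>
            obtain ⟨s', l⟩ := p
            have hs' : ¬ (s' = i) := by
              have := runsAspec_head_ge (pyGroupby xs) (i + 1) s' l t (by simpa [zrA] using hr)
              omega
            first
            | · simp [mergeS, hs']

theorem zeroRuns_eq_zrA (d : List Int) : zeroRuns d = zrA d 0 := by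
  have h := (scan_main d 0).1
  rw [show (0:Int) + (d.length : Int) = (d.length : Int) by ring] at h
  rw [← h]
  unfold zeroRuns flushAt
  cases scanZeroRuns d 0 none [] with
  | mk r st => cases st <;> simp

theorem loopA_char (seqid : String) (groups : List (List Int)) :
    ∀ (start : Int) (d : PySem.Dict String (List (Int × Int))),
      groupRegionsLoopA seqid groups start d =
        if runsAspec groups start = [] then d
        else d.insert seqid (d.getD seqid [] ++ runsAspec groups start) := by
  induction groups with
  | nil => intro start d; simp [groupRegionsLoopA, runsAspec]
  | cons x rest ih =>
    intro start d
    by_cases hc : PySem.List.pyGet? x 0 = some 0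
    · rw [show groupRegionsLoopA seqid (x :: rest) start d =
          groupRegionsLoopA seqid rest (start + (x.length : Int))
            (d.insert seqid (d.getD seqid [] ++ [(start, (x.length : Int))])) from by
        simp [groupRegionsLoopA, hc]]
      rw [ih]
      rw [show runsAspec (x :: rest) start =
          (start, (x.length : Int)) :: runsAspec rest (start + (x.length : Int)) from by
        simp [runsAspec, hc]]
      split
      · rename_i hr
        rw [if_neg (by simp)]
        rw [hr]
      · rename_i hr
        rw [PySem.Dict.getD_insert_self, PySem.Dict.insert_insert_self]
        rw [if_neg (by simp)]
        simp
    · rw [show groupRegionsLoopA seqid (x :: rest) start d =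
          groupRegionsLoopA seqid rest (start + (x.length : Int)) d from by
        simp [groupRegionsLoopA, hc]]
      rw [ih]
      rw [show runsAspec (x :: rest) start = runsAspec rest (start + (x.length : Int)) from by
        simp [runsAspec, hc]]

theorem foldB_init (v : String → List Int) (ks : List String) :
    ∀ accB : List (String × List (Int × Int)),
      ks.foldl (fun a k => if zeroRuns (v k) = [] then a else a ++ [(k, zeroRuns (v k))]) accB =
        accB ++ ks.foldl (fun a k => if zeroRuns (v k) = [] then a else a ++ [(k, zeroRuns (v k))]) [] := by
  induction ks with
  | nil => intro accB; simp
  | cons k ks ih =>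
    intro accB
    simp only [List.foldl_cons]
    by_cases hz : zeroRuns (v k) = []
    · simp only [if_pos hz]; exact ih accB
    · simp only [if_neg hz]
      rw [ih (accB ++ [(k, zeroRuns (v k))]), ih ([] ++ [(k, zeroRuns (v k))])]
      simp

theorem outer_fold (ks : List String) (v : String → List Int) :
    ∀ (acc : PySem.Dict String (List (Int × Int))),
      ks.Nodup → (∀ k ∈ ks, acc.contains k = false) →
      (ks.foldl (fun a k => groupRegionsLoopA k (pyGroupby (v k)) 0 a) acc).items =
        acc.items ++
          ks.foldl (fun a k => if zeroRuns (v k) = [] then a else a ++ [(k, zeroRuns (v k))]) [] := by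
  induction ks with
  | nil => intro acc _ _; simp
  | cons k ks ih =>
    intro acc hnd hfresh
    simp only [List.foldl_cons]
    have hk : acc.contains k = false := hfresh k (List.mem_cons_self ..)
    have hstep : (groupRegionsLoopA k (pyGroupby (v k)) 0 acc).items =
        acc.items ++ (if zeroRuns (v k) = [] then [] else [(k, zeroRuns (v k))]) := by
      rw [loopA_char, zeroRuns_eq_zrA]
      show _ = acc.items ++
        (if runsAspec (pyGroupby (v k)) 0 = [] then []
         else [(k, runsAspec (pyGroupby (v k)) 0)])
      split
      · simp
      · rw [PySem.Dict.getD_of_not_contains acc [] hk, List.nil_append,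
            PySem.Dict.items_insert_of_not_contains acc _ hk]
    have hfresh' : ∀ k' ∈ ks, (groupRegionsLoopA k (pyGroupby (v k)) 0 acc).contains k' = false := by
      intro k' hk'
      have hne : k' ≠ k := by
        intro h; subst h
        exact (List.nodup_cons.mp hnd).1 hk'
      rw [loopA_char]
      split
      · exact hfresh k' (List.mem_cons_of_mem _ hk')
      · rw [PySem.Dict.contains_insert]
        simp [hne, hfresh k' (List.mem_cons_of_mem _ hk')]
    rw [ih _ (List.nodup_cons.mp hnd).2 hfresh', hstep]
    rw [foldB_init v ks (if zeroRuns (v k) = [] then [] else [] ++ [(k, zeroRuns (v k))])]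
    by_cases hz : zeroRuns (v k) = [] <;> simp [hz]

-- ===== VERDICT (by name: the statement is the Claim_ definition above) =====
theorem group_regions_spec : Claim_equal_group_regions := by
  intro l _
  unfold Spec_group_regions group_regions group_regions_alt
  try dsimp only
  rw [PySem.Dict.items_eq_map_keys (PySem.Dict.ofList l) (PySem.Dict.nodup_keys_ofList l) [],
      List.foldl_map]
  have h := outer_fold ((PySem.Dict.ofList l).keys)
      (fun k => (PySem.Dict.ofList l).getD k [])
      PySem.Dict.empty (PySem.Dict.nodup_keys_ofList l) (by intro k _; simp [pysem])
  have he : (PySem.Dict.empty : PySem.Dict String (List (Int × Int))).items = [] := rfl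
  rw [he, List.nil_append] at h
  exact h
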